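-- pv_equiv track=rewrite | github.com/wazo-platform/wazo-call-logd | wazo_call_logd/plugins/support_center/services.py | _generate_qos_interval
-- ===== SOURCE A (Python) =====
-- def _generate_qos_interval(qos_thresholds):
--     qos_iter = iter(qos_thresholds)
--     prev = next(qos_iter, None)
--     yield 0, prev
--     if prev is None:
--         return
--     for current in qos_iter:
--         yield prev, current
--         prev = current
--     yield prev, None
-- ===== SOURCE B (Python) =====
-- def _generate_qos_interval(qos_thresholds):
--     padded = [0, *qos_thresholds, None]
--     yield from zip(padded, padded[1:])
-- ===== Notes on version B (the rewrite author's own statement) =====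
-- stated objective: idiomatic
-- what changed: Replaces the explicit prev-tracking iterator loop with building the padded boundary list [0, *thresholds, None] and zipping it with its own one-shifted tail.
import Mathlib
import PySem

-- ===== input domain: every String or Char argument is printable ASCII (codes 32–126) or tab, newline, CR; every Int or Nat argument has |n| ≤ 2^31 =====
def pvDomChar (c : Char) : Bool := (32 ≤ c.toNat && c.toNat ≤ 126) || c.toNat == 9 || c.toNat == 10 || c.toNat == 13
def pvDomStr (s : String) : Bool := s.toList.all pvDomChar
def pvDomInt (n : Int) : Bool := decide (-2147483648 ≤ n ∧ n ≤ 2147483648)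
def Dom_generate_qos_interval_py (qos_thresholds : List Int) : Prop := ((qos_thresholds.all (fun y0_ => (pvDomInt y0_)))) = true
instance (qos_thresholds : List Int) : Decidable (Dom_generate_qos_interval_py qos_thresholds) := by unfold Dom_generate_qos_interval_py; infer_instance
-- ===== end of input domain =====

-- B replaces A's prev-tracking loop by zipping the padded list [0, *thresholds, None] with its own tail (idiomatic; same cost).

-- ===== PORT A =====
-- A's for-loop over the rest of the iterator, carrying `prev`; ends with (prev, None).
def pvLoopA (prev : Int) : List Int → List (Option Int × Option Int)
  | [] => [(some prev, none)]
  | current :: rest => (some prev, some current) :: pvLoopA current rest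

def generate_qos_interval_py (qos_thresholds : List Int) : List (Option Int × Option Int) :=
  match qos_thresholds with
  | [] => [(some 0, none)]                         -- prev is None: yield (0, None) then return
  | p :: rest => (some 0, some p) :: pvLoopA p rest

-- ===== PORT B =====
def generate_qos_interval_py_alt (qos_thresholds : List Int) : List (Option Int × Option Int) :=
  let padded : List (Option Int) := some 0 :: qos_thresholds.map some ++ [none]
  padded.zip (padded.drop 1)

-- ===== PRECONDITION & SPEC =====
def Spec_generate_qos_interval_py (qos_thresholds : List Int) (out : List (Option Int × Option Int)) : Prop := out = generate_qos_interval_py_alt qos_thresholds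
instance (qos_thresholds : List Int) (out : List (Option Int × Option Int)) : Decidable (Spec_generate_qos_interval_py qos_thresholds out) := by unfold Spec_generate_qos_interval_py; infer_instance

-- ===== CLAIM (what is proved, stated in full; the proofs are below) =====
def Claim_equal_generate_qos_interval_py : Prop := ∀ (qos_thresholds : List Int), Dom_generate_qos_interval_py qos_thresholds → Spec_generate_qos_interval_py qos_thresholds (generate_qos_interval_py qos_thresholds)

-- ===== LEMMAS AND PROOFS =====
-- A's carried loop equals B's zip of the tail-padded list against its shift.
theorem pvLoopA_eq_zip (prev : Int) (rest : List Int) :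
    pvLoopA prev rest =
      (some prev :: rest.map some ++ [(none : Option Int)]).zip (rest.map some ++ [none]) := by
  induction rest generalizing prev with
  | nil => rfl
  | cons c t ih => simp [pvLoopA, ih c, List.zip]

-- ===== VERDICT (by name: the statement is the Claim_ definition above) =====
theorem generate_qos_interval_py_spec : Claim_equal_generate_qos_interval_py := by
  intro qos _
  unfold Spec_generate_qos_interval_py generate_qos_interval_py generate_qos_interval_py_alt
  cases qos with
  | nil => rfl
  | cons p rest => simp [pvLoopA_eq_zip, List.zip]
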